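-- pv_equiv track=rewrite | github.com/jaeuk412/PredictionServer | API/DataSet/backupfile/data_API_1110.py | get_period_value
-- ===== SOURCE A (Python) =====
-- def get_period_value(period):
--     period = period.split('~')
--
--     value = list()
--     for period_v in period:
--         count = 0
--         each_value = str()
--         valuecheck = list()
--
--
--         while(count < len(period_v)):
--             ## 숫자로 변환.
--             try:
--                 num = int(period_v[count])
--             except:
--                 num = period_v[count]
--
--             ## 숫자이면 값 넣기.
--             if isinstance(num, int):
--                 each_value += period_v[count]
--             ## 숫자 아니면 넣은값 저장.
--             else:
--                 if each_value:
--                     value.append(int(each_value))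
--                     valuecheck.append(int(each_value))
--                 each_value = str()
--
--             count += 1
--
--         ## 나머지 값 저장.
--         if count != 0:
--             if each_value:
--                 value.append(int(each_value))
--                 valuecheck.append(int(each_value))
--
--         ## 년/월/일/시/분/초 6개가 나와야함.
--         if len(valuecheck) != 6:
--             ## 부족한 개수만큼 추가.
--             aa = 0
--             while(aa < 6-len(valuecheck)):
--                 value.append(int(0))
--                 aa += 1
--     return value
-- ===== SOURCE B (Python) =====
-- def get_period_value(period):
--     # Token-level parse: mask non-digits to spaces, split into digit runs, pad each segment to at least 6 values.
--     value = []
--     for seg in period.split('~'):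
--         tokens = ''.join(c if c.isdigit() else ' ' for c in seg).split()
--         value += [int(t) for t in tokens]
--         value += [0] * (6 - len(tokens))
--     return value
-- ===== Notes on version B (the rewrite author's own statement) =====
-- stated objective: faster
-- what changed: Replaces the character-by-character while loop with try/except digit probing and manual run-accumulator state by a token-level parse: mask non-digits to spaces, split each segment into whole digit tokens with str.split, convert them, and pad with max(0, 6 - len(tokens)) zeros arithmetically instead of a counting while loop.
import Mathlib
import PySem

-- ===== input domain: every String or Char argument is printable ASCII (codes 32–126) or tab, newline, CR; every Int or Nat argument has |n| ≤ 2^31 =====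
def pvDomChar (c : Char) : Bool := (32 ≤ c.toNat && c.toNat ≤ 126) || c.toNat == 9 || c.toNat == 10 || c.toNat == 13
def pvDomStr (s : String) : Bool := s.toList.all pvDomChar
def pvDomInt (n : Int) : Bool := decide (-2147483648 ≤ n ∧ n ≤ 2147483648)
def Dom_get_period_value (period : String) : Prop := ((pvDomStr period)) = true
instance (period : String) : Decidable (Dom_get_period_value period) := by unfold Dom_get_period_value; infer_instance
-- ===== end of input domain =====

-- ===== PORT A =====
-- int(each_value): each_value is a nonempty digit run when parsed, so ofChars? never returns none there
def pvParse (cs : List Char) : Int := (PySem.Int.ofChars? cs).getD 0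

-- one iteration of A's inner while loop; state = (value, each_value, valuecheck)
def pvAStep (st : List Int × List Char × List Int) (c : Char) : List Int × List Char × List Int :=
  match st with
  | (value, each, vc) =>
    -- try: num = int(period_v[count]); isinstance(num, int) ⇔ int(c) did not raise
    if (PySem.Int.ofChars? [c]).isSome then (value, each ++ [c], vc)
    else if each.isEmpty then (value, [], vc)
    else (value ++ [pvParse each], [], vc ++ [pvParse each])

-- body of A's outer for loop for one '~'-segment
def pvASeg (value : List Int) (seg : List Char) : List Int :=
  let st := seg.foldl pvAStep (value, ([] : List Char), ([] : List Int))
  let st2 : List Int × List Int :=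
    if seg.length ≠ 0 then
      (if st.2.1.isEmpty then (st.1, st.2.2)
       else (st.1 ++ [pvParse st.2.1], st.2.2 ++ [pvParse st.2.1]))
    else (st.1, st.2.2)
  -- while aa < 6 - len(valuecheck): value.append(0)
  if st2.2.length ≠ 6 then st2.1 ++ List.replicate (6 - st2.2.length) 0 else st2.1

def get_period_value (period : String) : List Int :=
  (PySem.Chars.splitOn period.toList ['~']).foldl pvASeg []

-- ===== PORT B =====
def pvMask (c : Char) : Char := if PySem.Chars.isdigit c then c else ' '

-- body of B's loop for one '~'-segment
def pvBSeg (value : List Int) (seg : List Char) : List Int :=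
  let tokens := PySem.Chars.split₀ (seg.map pvMask)
  value ++ tokens.map pvParse ++ List.replicate (6 - tokens.length) 0

def get_period_value_alt (period : String) : List Int :=
  (PySem.Chars.splitOn period.toList ['~']).foldl pvBSeg []

-- ===== PRECONDITION & SPEC =====
def Spec_get_period_value (period : String) (out : List Int) : Prop := out = get_period_value_alt period
instance (period : String) (out : List Int) : Decidable (Spec_get_period_value period out) := by unfold Spec_get_period_value; infer_instance

-- ===== CLAIM (what is proved, stated in full; the proofs are below) =====
def Claim_equal_get_period_value : Prop := ∀ (period : String), Dom_get_period_value period → Spec_get_period_value period (get_period_value period)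

-- ===== LEMMAS AND PROOFS =====

-- spec-level tokenizer: the digit runs of cs, continuing the reversed run cur
def pvToks (cs : List Char) (cur : List Char) : List (List Char) :=
  match cs with
  | [] => if cur.isEmpty then [] else [cur.reverse]
  | c :: r =>
    if PySem.Chars.isdigit c then pvToks r (c :: cur)
    else if cur.isEmpty then pvToks r [] else cur.reverse :: pvToks r []

-- on domain chars, int(c) succeeds exactly on ASCII digits
lemma pv_ofChars_isSome (c : Char) (h : pvDomChar c = true) :
    (PySem.Int.ofChars? [c]).isSome = PySem.Chars.isdigit c := by
  have hall : ∀ n : Fin 127,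
      pvDomChar (Char.ofNat n.1) = true →
      (PySem.Int.ofChars? [Char.ofNat n.1]).isSome = PySem.Chars.isdigit (Char.ofNat n.1) := by
    decide
  have hlt : c.toNat < 127 := by
    simp [pvDomChar] at h
    omega
  have := hall ⟨c.toNat, hlt⟩ (by simpa [Char.ofNat_toNat] using h)
  simpa [Char.ofNat_toNat] using this

lemma pv_isspace_of_isdigit (c : Char) (h : PySem.Chars.isdigit c = true) :
    PySem.Chars.isspace c = false := by
  have hn : 48 ≤ c.toNat ∧ c.toNat ≤ 57 := by
    unfold PySem.Chars.isdigit at h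
    simp only [Bool.and_eq_true, decide_eq_true_eq, Char.le_def] at h
    exact ⟨h.1, h.2⟩
  unfold PySem.Chars.isspace
  simp only [Bool.or_eq_false_iff, Bool.and_eq_false_iff, decide_eq_false_iff_not]
  omega

-- unfolding equations of split₀.go (its match compiles to brecOn, so we state the steps once)
lemma pv_go_nil (cur acc) : PySem.Chars.split₀.go [] cur acc =
    (if cur.isEmpty then acc.reverse else (cur.reverse :: acc).reverse) := by
  by_cases h : cur.isEmpty <;>
    simp only [PySem.Chars.split₀.go, h, if_true, if_false, Bool.false_eq_true]

lemma pv_go_nonspace (c : Char) (r cur acc) (hs : PySem.Chars.isspace c = false) :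
    PySem.Chars.split₀.go (c :: r) cur acc = PySem.Chars.split₀.go r (c :: cur) acc := by
  rw [PySem.Chars.split₀.go]; simp [hs]

lemma pv_go_space (c : Char) (r cur acc) (hs : PySem.Chars.isspace c = true) :
    PySem.Chars.split₀.go (c :: r) cur acc =
    (if cur.isEmpty then PySem.Chars.split₀.go r [] acc
     else PySem.Chars.split₀.go r [] (cur.reverse :: acc)) := by
  rw [PySem.Chars.split₀.go]
  by_cases h : cur.isEmpty <;> simp [hs, h]

lemma pv_go_acc (cs cur acc) :
    PySem.Chars.split₀.go cs cur acc = acc.reverse ++ PySem.Chars.split₀.go cs cur [] := by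
  induction cs generalizing cur acc with
  | nil => by_cases h : cur.isEmpty <;> simp [pv_go_nil, h]
  | cons c r ih =>
    by_cases hs : PySem.Chars.isspace c
    · by_cases h : cur.isEmpty
      · simp only [pv_go_space c r cur _ hs, h, if_true]
        exact ih [] acc
      · simp only [pv_go_space c r cur _ hs, h, Bool.false_eq_true, if_false]
        rw [ih [] (cur.reverse :: acc), ih [] [cur.reverse]]
        simp
    · rw [pv_go_nonspace c r cur acc (by simpa using hs),
        pv_go_nonspace c r cur [] (by simpa using hs)]
      exact ih (c :: cur) acc

lemma pv_split₀_mask (cs cur : List Char) :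
    PySem.Chars.split₀.go (cs.map pvMask) cur [] = pvToks cs cur := by
  induction cs generalizing cur with
  | nil => by_cases h : cur.isEmpty <;> simp [pv_go_nil, pvToks, h]
  | cons c r ih =>
    by_cases hd : PySem.Chars.isdigit c
    · have hs := pv_isspace_of_isdigit c hd
      have hm : pvMask c = c := by simp [pvMask, hd]
      simp only [List.map_cons, hm, pv_go_nonspace c _ cur [] hs, pvToks, hd, if_true]
      exact ih (c :: cur)
    · have hm : pvMask c = ' ' := by simp [pvMask, hd]
      have hs : PySem.Chars.isspace ' ' = true := by decide
      by_cases h : cur.isEmpty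
      · simp only [List.map_cons, hm, pv_go_space _ _ cur [] hs, h, if_true, pvToks, hd,
          Bool.false_eq_true, if_false]
        exact ih []
      · simp only [List.map_cons, hm, pv_go_space _ _ cur [] hs, h, pvToks, hd,
          Bool.false_eq_true, if_false]
        rw [pv_go_acc, ih]
        simp

-- A's inner loop, finished by the trailing flush, produces exactly the parsed tokens
lemma pv_afold (cs : List Char) (value : List Int) (each : List Char) (vc : List Int)
    (hdom : cs.all pvDomChar = true) :
    (let st := cs.foldl pvAStep (value, each, vc)
     ((st.1 ++ (if st.2.1.isEmpty then [] else [pvParse st.2.1])),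
      (st.2.2 ++ (if st.2.1.isEmpty then [] else [pvParse st.2.1])))) =
    (value ++ (pvToks cs each.reverse).map pvParse,
     vc ++ (pvToks cs each.reverse).map pvParse) := by
  induction cs generalizing value each vc with
  | nil =>
    by_cases h : each.isEmpty
    · simp_all [pvToks]
    · have h2 : each.reverse.isEmpty = false := by
        simp_all [List.isEmpty_iff]
      simp_all [pvToks]
  | cons c r ih =>
    simp only [List.all_cons, Bool.and_eq_true] at hdom
    obtain ⟨hc, hr⟩ := hdom
    by_cases hd : PySem.Chars.isdigit c
    · have hsome : (PySem.Int.ofChars? [c]).isSome = true := by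
        rw [pv_ofChars_isSome c hc]; exact hd
      simp only [List.foldl_cons, pvAStep, hsome, if_true, pvToks, hd]
      simpa using ih value (each ++ [c]) vc hr
    · have hsome : (PySem.Int.ofChars? [c]).isSome = false := by
        rw [pv_ofChars_isSome c hc]; simpa using hd
      by_cases h : each.isEmpty
      · have h2 : each.reverse.isEmpty = true := by simp_all [List.isEmpty_iff]
        simp only [List.foldl_cons, pvAStep, hsome, h, pvToks, hd, h2,
          Bool.false_eq_true, if_false, if_true]
        simpa using ih value [] vc hr
      · have h2 : each.reverse.isEmpty = false := by simp_all [List.isEmpty_iff]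
        simp only [List.foldl_cons, pvAStep, hsome, h, pvToks, hd, h2,
          Bool.false_eq_true, if_false]
        rw [ih (value ++ [pvParse each]) [] (vc ++ [pvParse each]) hr]
        simp

-- the tail of a segment's processing: flush + pad, for an arbitrary loop state F
lemma pv_seg_core (F : List Int × List Char × List Int) (value M : List Int) (n : Nat)
    (h1 : F.1 ++ (if F.2.1.isEmpty then [] else [pvParse F.2.1]) = value ++ M)
    (h2 : F.2.2 ++ (if F.2.1.isEmpty then [] else [pvParse F.2.1]) = M)
    (hn : M.length = n) :
    (let st2 := if F.2.1.isEmpty then (F.1, F.2.2)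
                else (F.1 ++ [pvParse F.2.1], F.2.2 ++ [pvParse F.2.1]);
     if st2.2.length ≠ 6 then st2.1 ++ List.replicate (6 - st2.2.length) 0 else st2.1)
    = value ++ M ++ List.replicate (6 - n) 0 := by
  by_cases he : F.2.1.isEmpty
  · simp only [he, if_true, List.append_nil] at h1 h2 ⊢
    rw [h1, h2, hn]
    by_cases h6 : n = 6 <;> simp [h6, List.append_assoc]
  · simp only [he, Bool.false_eq_true, if_false] at h1 h2 ⊢
    rw [h1, h2, hn]
    by_cases h6 : n = 6 <;> simp [h6, List.append_assoc]

lemma pv_seg_eq (value : List Int) (seg : List Char) (hdom : seg.all pvDomChar = true) :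
    pvASeg value seg = pvBSeg value seg := by
  have htok : PySem.Chars.split₀ (seg.map pvMask) = pvToks seg [] := by
    rw [PySem.Chars.split₀, pv_split₀_mask]
  cases seg with
  | nil =>
    simp [pvASeg, pvBSeg, PySem.Chars.split₀, pv_go_nil]
  | cons c r =>
    have hfold := pv_afold (c :: r) value [] [] hdom
    simp only [List.reverse_nil, Prod.mk.injEq] at hfold
    simp only [pvASeg, pvBSeg, htok, List.length_cons, ne_eq, Nat.succ_ne_zero,
      not_false_iff, if_true, ]
    exact pv_seg_core _ value _ _ hfold.1 hfold.2 (List.length_map _)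

lemma pv_splitOn_all (p : Char → Bool) (sep : List Char) :
    ∀ (fuel : Nat) (l cur : List Char) (acc : List (List Char)),
      l.all p = true → cur.all p = true → (∀ s ∈ acc, s.all p = true) →
      ∀ s ∈ PySem.Chars.splitOn.go sep fuel l cur acc, s.all p = true := by
  intro fuel
  induction fuel with
  | zero =>
    intro l cur acc hl hcur hacc s hs
    simp only [PySem.Chars.splitOn.go, List.mem_reverse, List.mem_cons] at hs
    rcases hs with h | h
    · subst h; simp_all
    · exact hacc s h
  | succ n ih =>
    intro l cur acc hl hcur hacc s hs
    cases l with
    | nil =>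
      simp only [PySem.Chars.splitOn.go, List.mem_reverse, List.mem_cons] at hs
      rcases hs with h | h
      · subst h; simp_all
      · exact hacc s h
    | cons c rest =>
      by_cases hp : sep.isPrefixOf (c :: rest) = true
      · rw [PySem.Chars.splitOn.go] at hs
        simp only [hp, if_true] at hs
        refine ih _ _ _ ?_ rfl ?_ s hs
        · rw [List.all_eq_true] at hl ⊢
          intro x hx
          exact hl x ((List.drop_sublist _ _).mem hx)
        · intro t ht
          rcases List.mem_cons.mp ht with h | h
          · subst h; simpa using hcur
          · exact hacc t h
      · rw [PySem.Chars.splitOn.go] at hs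
        simp only [hp, if_false, Bool.false_eq_true] at hs
        simp only [List.all_cons, Bool.and_eq_true] at hl
        exact ih _ _ _ hl.2 (by simp_all) hacc s hs

lemma pv_foldl_eq (segs : List (List Char)) (value : List Int)
    (hdom : ∀ s ∈ segs, s.all pvDomChar = true) :
    segs.foldl pvASeg value = segs.foldl pvBSeg value := by
  induction segs generalizing value with
  | nil => rfl
  | cons s r ih =>
    simp only [List.foldl_cons]
    rw [pv_seg_eq value s (hdom s (List.mem_cons_self))]
    exact ih _ (fun t ht => hdom t (List.mem_cons_of_mem _ ht))

-- ===== VERDICT (by name: the statement is the Claim_ definition above) =====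
theorem get_period_value_spec : Claim_equal_get_period_value := by
  intro period hdom
  unfold Spec_get_period_value get_period_value get_period_value_alt
  apply pv_foldl_eq
  intro s hs
  unfold Dom_get_period_value pvDomStr at hdom
  rw [PySem.Chars.splitOn] at hs
  exact pv_splitOn_all pvDomChar ['~'] _ _ _ _ hdom rfl (by simp) s hs
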